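-- pv_equiv track=rewrite | github.com/csaratchandra/ProductOS | core/python/productos_runtime/v5.py | _explicit_post_prd_stage_count
-- ===== SOURCE A (Python) =====
-- from typing import Any
--
-- def _explicit_post_prd_stage_count(item_state: dict[str, Any]) -> int:
--     after_handoff = False
--     count = 0
--     for stage in item_state["lifecycle_stages"]:
--         if stage["stage_key"] == "prd_handoff":
--             after_handoff = True
--             continue
--         if after_handoff and stage["status"] == "not_started":
--             count += 1
--     return count
-- ===== SOURCE B (Python) =====
-- def _explicit_post_prd_stage_count(item_state):
--     stages = item_state["lifecycle_stages"]
--     keys = [s["stage_key"] for s in stages]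
--     try:
--         i = keys.index("prd_handoff")
--     except ValueError:
--         return 0
--     return sum(1 for s in stages[i + 1:]
--                if s["stage_key"] != "prd_handoff" and s["status"] == "not_started")
-- ===== Notes on version B (the rewrite author's own statement) =====
-- stated objective: alternative
-- what changed: A's single stateful scan with an after_handoff flag is replaced by a locate-then-count decomposition: find the index of the first 'prd_handoff' stage key, return 0 if absent, else count not_started non-marker stages in the suffix after it.
import Mathlib
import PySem

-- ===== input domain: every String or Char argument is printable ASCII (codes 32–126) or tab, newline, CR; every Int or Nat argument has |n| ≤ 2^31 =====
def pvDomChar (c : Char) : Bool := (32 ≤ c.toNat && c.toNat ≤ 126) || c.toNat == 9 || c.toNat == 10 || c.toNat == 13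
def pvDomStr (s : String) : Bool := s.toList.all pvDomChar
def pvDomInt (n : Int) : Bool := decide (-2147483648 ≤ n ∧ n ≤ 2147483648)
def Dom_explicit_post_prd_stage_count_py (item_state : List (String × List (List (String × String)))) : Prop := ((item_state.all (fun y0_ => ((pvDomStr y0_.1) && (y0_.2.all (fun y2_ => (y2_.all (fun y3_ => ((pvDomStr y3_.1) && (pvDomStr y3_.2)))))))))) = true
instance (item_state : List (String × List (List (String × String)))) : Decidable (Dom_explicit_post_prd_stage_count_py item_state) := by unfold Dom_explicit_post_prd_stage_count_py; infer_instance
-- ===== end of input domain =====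

-- B replaces A's single stateful flag-scan by a locate-the-first-'prd_handoff'-then-count-the-suffix
-- decomposition (objective: alternative decomposition, same cost).

-- Python dict access d[k] on an association list: first match, none = KeyError (exact).
def pvLookup {ν : Type} (d : List (String × ν)) (k : String) : Option ν :=
  match d with
  | [] => none
  | (k', v) :: rest => if k' = k then some v else pvLookup rest k

-- ===== PORT A =====
-- A's loop: state (after_handoff, count); none = a KeyError inside the loop.
def pvALoop : List (List (String × String)) → Bool → Int → Option Int
  | [], _, count => some count
  | stage :: rest, after, count =>
    match pvLookup stage "stage_key" with
    | none => none
    | some k =>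
      if k = "prd_handoff" then pvALoop rest true count
      else if after then
        match pvLookup stage "status" with
        | none => none
        | some st => pvALoop rest after (if st = "not_started" then count + 1 else count)
      else pvALoop rest after count

def explicit_post_prd_stage_count_py (item_state : List (String × List (List (String × String)))) : Int :=
  match pvLookup item_state "lifecycle_stages" with
  | none => 0          -- KeyError: excluded by Pre_
  | some stages => (pvALoop stages false 0).getD 0   -- none (KeyError) excluded by Pre_

-- ===== PORT B =====
-- [s["stage_key"] for s in stages]; none = KeyError.
def pvKeys : List (List (String × String)) → Option (List String)
  | [] => some []
  | s :: rest =>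
    match pvLookup s "stage_key" with
    | none => none
    | some k => (pvKeys rest).map (k :: ·)

-- the sum(...) comprehension over the suffix; none = KeyError.
def pvCountB : List (List (String × String)) → Option Int
  | [] => some 0
  | s :: rest =>
    match pvLookup s "stage_key" with
    | none => none
    | some k =>
      if k = "prd_handoff" then pvCountB rest
      else
        match pvLookup s "status" with
        | none => none
        | some st => (pvCountB rest).map (fun c => if st = "not_started" then c + 1 else c)

def explicit_post_prd_stage_count_py_alt (item_state : List (String × List (List (String × String)))) : Int :=
  match pvLookup item_state "lifecycle_stages" with
  | none => 0          -- KeyError: excluded by Pre_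
  | some stages =>
    match pvKeys stages with
    | none => 0        -- KeyError: excluded by Pre_
    | some keys =>
      match PySem.List.index? keys "prd_handoff" with
      | none => 0      -- keys.index raised ValueError: B returns 0
      | some i => (pvCountB (stages.drop (i + 1))).getD 0   -- stages[i+1:]; none excluded by Pre_

-- ===== PRECONDITION & SPEC =====
-- Pre_ excludes exactly the inputs on which A raises KeyError: a missing "lifecycle_stages" key,
-- a stage without "stage_key", or a stage after the first 'prd_handoff' marker that is not itself
-- a marker and lacks "status".
def Pre_explicit_post_prd_stage_count_py (item_state : List (String × List (List (String × String)))) : Prop :=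
  (item_state.lookup "lifecycle_stages").isSome ∧
  (∀ s ∈ (item_state.lookup "lifecycle_stages").getD [], (s.lookup "stage_key").isSome) ∧
  (∀ s ∈ ((item_state.lookup "lifecycle_stages").getD []).dropWhile
       (fun t => !(t.lookup "stage_key" == some "prd_handoff")),
     s.lookup "stage_key" = some "prd_handoff" ∨ (s.lookup "status").isSome)
instance (item_state : List (String × List (List (String × String)))) : Decidable (Pre_explicit_post_prd_stage_count_py item_state) := by unfold Pre_explicit_post_prd_stage_count_py; infer_instance

def pvWitness_explicit_post_prd_stage_count_py : (List (String × List (List (String × String)))) :=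
  [("lifecycle_stages",
    [[("stage_key", "draft"), ("status", "done")],
     [("stage_key", "prd_handoff")],
     [("stage_key", "build"), ("status", "not_started")]])]

def Spec_explicit_post_prd_stage_count_py (item_state : List (String × List (List (String × String)))) (out : Int) : Prop := out = explicit_post_prd_stage_count_py_alt item_state
instance (item_state : List (String × List (List (String × String)))) (out : Int) : Decidable (Spec_explicit_post_prd_stage_count_py item_state out) := by unfold Spec_explicit_post_prd_stage_count_py; infer_instance

-- ===== CLAIM (what is proved, stated in full; the proofs are below) =====
def Claim_equal_explicit_post_prd_stage_count_py : Prop := ∀ (item_state : List (String × List (List (String × String)))), Dom_explicit_post_prd_stage_count_py item_state → Pre_explicit_post_prd_stage_count_py item_state → Spec_explicit_post_prd_stage_count_py item_state (explicit_post_prd_stage_count_py item_state)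

-- ===== LEMMAS AND PROOFS =====

-- pvLookup is Python's first-match dict access = the standard association-list lookup
theorem pvLookup_eq {ν : Type} (d : List (String × ν)) (k : String) :
    pvLookup d k = d.lookup k := by
  induction d with
  | nil => rfl
  | cons p rest ih =>
    obtain ⟨k', v⟩ := p
    simp only [pvLookup, List.lookup]
    by_cases h : k' = k
    · simp [h]
    · simp [h, beq_false_of_ne (Ne.symm h), ih]

theorem pvWitness_ok : Dom_explicit_post_prd_stage_count_py pvWitness_explicit_post_prd_stage_count_py ∧ Pre_explicit_post_prd_stage_count_py pvWitness_explicit_post_prd_stage_count_py := by decide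

-- A's loop after the flag has been set counts exactly what pvCountB counts (shifted by the accumulator).
theorem pvALoop_true (stages : List (List (String × String))) (c : Int) :
    pvALoop stages true c = (pvCountB stages).map (fun x => c + x) := by
  induction stages generalizing c with
  | nil => simp [pvALoop, pvCountB]
  | cons s rest ih =>
    simp only [pvALoop, pvCountB]
    cases hk : pvLookup s "stage_key" with
    | none => rfl
    | some k =>
      by_cases hkey : k = "prd_handoff"
      · simp [hkey, ih]
      · simp only [hkey, if_false, if_true]
        cases hst : pvLookup s "status" with
        | none => rfl
        | some st =>
          simp only [ih]
          cases pvCountB rest with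
          | none => rfl
          | some c' =>
            simp only [Option.map_some]
            by_cases h : st = "not_started" <;> (simp [h]; try ring)

-- all stage_keys present → the keys comprehension succeeds
theorem pvKeys_isSome (stages : List (List (String × String)))
    (h : ∀ s ∈ stages, (pvLookup s "stage_key").isSome) : ∃ ks, pvKeys stages = some ks := by
  induction stages with
  | nil => exact ⟨[], rfl⟩
  | cons s rest ih =>
    obtain ⟨k, hk⟩ := Option.isSome_iff_exists.mp (h s (by simp))
    obtain ⟨ks, hks⟩ := ih (fun t ht => h t (by simp [ht]))
    exact ⟨k :: ks, by simp [pvKeys, hk, hks]⟩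

-- in the suffix: every stage has stage_key, and non-marker stages have status → the count succeeds
theorem pvCountB_isSome (stages : List (List (String × String)))
    (h1 : ∀ s ∈ stages, (pvLookup s "stage_key").isSome)
    (h2 : ∀ s ∈ stages, pvLookup s "stage_key" = some "prd_handoff" ∨ (pvLookup s "status").isSome) :
    ∃ c, pvCountB stages = some c := by
  induction stages with
  | nil => exact ⟨0, rfl⟩
  | cons s rest ih =>
    obtain ⟨k, hk⟩ := Option.isSome_iff_exists.mp (h1 s (by simp))
    obtain ⟨c, hc⟩ := ih (fun t ht => h1 t (by simp [ht])) (fun t ht => h2 t (by simp [ht]))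
    by_cases hkey : k = "prd_handoff"
    · exact ⟨c, by simp [pvCountB, hk, hkey, hc]⟩
    · rcases h2 s (by simp) with hmark | hst
      · exact absurd (by rw [hk] at hmark; exact Option.some.inj hmark) hkey
      · obtain ⟨st, hst'⟩ := Option.isSome_iff_exists.mp hst
        exact ⟨if st = "not_started" then c + 1 else c, by simp [pvCountB, hk, hkey, hst', hc]⟩

-- the B-side value for a stage list (what _alt computes once lifecycle_stages is extracted)
def pvAfter (stages : List (List (String × String))) : Int :=
  match pvKeys stages with
  | none => 0
  | some keys =>
    match PySem.List.index? keys "prd_handoff" with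
    | none => 0
    | some i => (pvCountB (stages.drop (i + 1))).getD 0

theorem pvAfter_spec (stages : List (List (String × String)))
    (h1 : ∀ s ∈ stages, (pvLookup s "stage_key").isSome)
    (h2 : ∀ s ∈ stages.dropWhile (fun t => !(pvLookup t "stage_key" == some "prd_handoff")),
       pvLookup s "stage_key" = some "prd_handoff" ∨ (pvLookup s "status").isSome) :
    pvALoop stages false 0 = some (pvAfter stages) := by
  induction stages with
  | nil => rfl
  | cons s rest ih =>
    obtain ⟨k, hk⟩ := Option.isSome_iff_exists.mp (h1 s (by simp))
    have h1' : ∀ t ∈ rest, (pvLookup t "stage_key").isSome := fun t ht => h1 t (by simp [ht])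
    obtain ⟨ks, hks⟩ := pvKeys_isSome rest h1'
    by_cases hkey : k = "prd_handoff"
    · -- head is the marker: A sets the flag; B finds index 0 and counts the tail
      have hdw : (s :: rest).dropWhile (fun t => !(pvLookup t "stage_key" == some "prd_handoff"))
          = s :: rest := by
        rw [List.dropWhile_cons_of_neg]; simp [hk, hkey]
      rw [hdw] at h2
      obtain ⟨c, hc⟩ := pvCountB_isSome rest h1' (fun t ht => h2 t (by simp [ht]))
      have hA : pvALoop (s :: rest) false 0 = pvCountB rest := by
        simp [pvALoop, hk, hkey, pvALoop_true]
      have hkeys : pvKeys (s :: rest) = some ("prd_handoff" :: ks) := by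
        simp [pvKeys, hk, hkey, hks]
      rw [hA, hc]
      simp only [pvAfter, hkeys]
      rw [PySem.List.index?_cons_self]
      simp [hc]
    · -- head is not the marker and the flag is still down: both sides skip it
      have hdw : (s :: rest).dropWhile (fun t => !(pvLookup t "stage_key" == some "prd_handoff"))
          = rest.dropWhile (fun t => !(pvLookup t "stage_key" == some "prd_handoff")) := by
        rw [List.dropWhile_cons_of_pos]; simp [hk, hkey]
      rw [hdw] at h2
      have hA : pvALoop (s :: rest) false 0 = pvALoop rest false 0 := by
        simp [pvALoop, hk, hkey]
      rw [hA, ih h1' h2]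
      congr 1
      have hkeys : pvKeys (s :: rest) = some (k :: ks) := by simp [pvKeys, hk, hks]
      have hidx : PySem.List.index? (k :: ks) "prd_handoff"
          = (PySem.List.index? ks "prd_handoff").map (· + 1) :=
        PySem.List.index?_cons_of_ne ks hkey
      simp only [pvAfter, hkeys, hks, hidx]
      cases PySem.List.index? ks "prd_handoff" with
      | none => rfl
      | some i => simp [List.drop_succ_cons]

-- ===== VERDICT (by name: the statement is the Claim_ definition above) =====
theorem explicit_post_prd_stage_count_py_spec : Claim_equal_explicit_post_prd_stage_count_py := by
  intro item_state _ hpre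
  unfold Spec_explicit_post_prd_stage_count_py
  unfold Pre_explicit_post_prd_stage_count_py at hpre
  obtain ⟨hsome, h1, h2⟩ := hpre
  simp only [← pvLookup_eq] at hsome h1 h2
  obtain ⟨stages, hE⟩ := Option.isSome_iff_exists.mp hsome
  rw [hE] at h1 h2
  simp only [Option.getD_some] at h1 h2
  unfold explicit_post_prd_stage_count_py explicit_post_prd_stage_count_py_alt
  rw [hE]
  show (pvALoop stages false 0).getD 0 = _
  rw [pvAfter_spec stages h1 h2]
  rfl
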